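-- pv_equiv track=rewrite | github.com/ashish91/leetcode-solutions | contests/biweekly/biweekly-contest-44/decode-xored-permutation.py | decode
-- ===== SOURCE A (Python) =====
-- from typing import List
--
-- def decode(encoded: List[int]) -> List[int]:
--   all = 0
--   excluding_first = 0
--   n = len(encoded)
--
--   for i in range(n):
--     all ^= i+1
--     if i%2 != 0:
--       excluding_first ^= encoded[i]
--
--   all ^= (n+1)
--   first = all ^ excluding_first
--   ans = [first]
--   for v in encoded:
--     next = ans[-1] ^v
--     ans.append(next)
--
--   return ans
-- ===== SOURCE B (Python) =====
-- from typing import List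
--
-- def decode(encoded: List[int]) -> List[int]:
--   n = len(encoded)
--   # XOR of the whole permutation 1..n+1
--   total = 0
--   for k in range(1, n + 2):
--     total ^= k
--   # XOR of the even-indexed encoded values isolates the LAST element of the permutation
--   evens = 0
--   i = 0
--   while i < n:
--     evens ^= encoded[i]
--     i += 2
--   last = total ^ evens
--   # reconstruct backwards from the last element, then reverse
--   res = [last]
--   for v in reversed(encoded):
--     res.append(res[-1] ^ v)
--   res.reverse()
--   return res
-- ===== Notes on version B (the rewrite author's own statement) =====
-- stated objective: alternative
-- what changed: B anchors the reconstruction at the opposite end: it derives the LAST element as XOR(1..n+1) ^ XOR(even-indexed encoded values) and rebuilds the answer backwards over reversed(encoded), reversing at the end, instead of A's forward pass that derives the FIRST element from the odd-indexed encoded values and appends forwards.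
import Mathlib
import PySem

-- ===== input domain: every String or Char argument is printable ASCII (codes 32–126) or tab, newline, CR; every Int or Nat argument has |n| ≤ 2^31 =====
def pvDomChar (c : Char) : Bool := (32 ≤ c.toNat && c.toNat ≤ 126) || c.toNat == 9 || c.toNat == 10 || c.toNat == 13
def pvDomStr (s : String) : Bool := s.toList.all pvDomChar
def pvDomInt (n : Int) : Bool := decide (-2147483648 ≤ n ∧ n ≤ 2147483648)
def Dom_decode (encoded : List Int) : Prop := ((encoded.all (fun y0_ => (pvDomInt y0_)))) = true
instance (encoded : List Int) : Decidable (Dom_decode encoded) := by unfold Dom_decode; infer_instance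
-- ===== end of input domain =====

-- B anchors at the opposite end: it derives the LAST element from XOR(1..n+1) and the
-- even-indexed encoded values and rebuilds the answer backwards, then reverses (alternative).

-- ===== PORT A =====
def decode (encoded : List Int) : List Int :=
  let n : Nat := encoded.length
  let s := (PySem.List.pyRange 0 (n : Int) 1).foldl
    (fun (s : Int × Int) i =>
      ( PySem.Int.bxor s.1 (i + 1),
        if PySem.Int.mod i 2 ≠ 0 then
          PySem.Int.bxor s.2 ((PySem.List.pyGet? encoded i).getD 0)
        else s.2 ))
    (0, 0)
  let all := PySem.Int.bxor s.1 ((n : Int) + 1)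
  let first := PySem.Int.bxor all s.2
  encoded.foldl
    (fun ans v => ans ++ [PySem.Int.bxor ((PySem.List.pyGet? ans (-1)).getD 0) v])
    [first]

-- ===== PORT B =====
-- B's stride-2 index walk: while i < len: acc ^= encoded[i]; i += 2
def xorStride (encoded : List Int) (acc : Int) (i : Nat) : Int :=
  if h : i < encoded.length then
    xorStride encoded (PySem.Int.bxor acc ((PySem.List.pyGet? encoded (i : Int)).getD 0)) (i + 2)
  else acc
termination_by encoded.length - i

def decode_alt (encoded : List Int) : List Int :=
  let n : Nat := encoded.length
  let total := (PySem.List.pyRange 1 ((n : Int) + 2) 1).foldl (fun t k => PySem.Int.bxor t k) 0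
  let evens := xorStride encoded 0 0
  let last := PySem.Int.bxor total evens
  let res := encoded.reverse.foldl
    (fun res v => res ++ [PySem.Int.bxor ((PySem.List.pyGet? res (-1)).getD 0) v])
    [last]
  res.reverse

-- ===== PRECONDITION & SPEC =====
def Spec_decode (encoded : List Int) (out : List Int) : Prop := out = decode_alt encoded
instance (encoded : List Int) (out : List Int) : Decidable (Spec_decode encoded out) := by unfold Spec_decode; infer_instance

-- ===== CLAIM (what is proved, stated in full; the proofs are below) =====
def Claim_equal_decode : Prop := ∀ (encoded : List Int), Dom_decode encoded → Spec_decode encoded (decode encoded)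

-- ===== LEMMAS AND PROOFS =====

-- integers in two's-complement coding: every Int is ↑m or -↑m-1
theorem pv_int_rep (a : Int) : (∃ m : Nat, a = (m : Int)) ∨ (∃ m : Nat, a = -(m : Int) - 1) := by
  rcases (by omega : 0 ≤ a ∨ a < 0) with h | h
  · exact Or.inl ⟨a.toNat, by omega⟩
  · exact Or.inr ⟨(-a - 1).toNat, by omega⟩

theorem pv_bxor_cn (m n : Nat) :
    PySem.Int.bxor (m : Int) (-(n : Int) - 1) = -((m ^^^ n : Nat) : Int) - 1 := by
  have h1 : (0 : Int) ≤ (m : Int) := by positivity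
  have h2 : ¬ (0 : Int) ≤ -(n : Int) - 1 := by omega
  simp only [PySem.Int.bxor, if_pos h1, if_neg h2]
  have hn : (-(-(n : Int) - 1) - 1) = (n : Int) := by ring
  rw [hn]
  simp

theorem pv_bxor_nc (m n : Nat) :
    PySem.Int.bxor (-(m : Int) - 1) (n : Int) = -((m ^^^ n : Nat) : Int) - 1 := by
  rw [PySem.Int.bxor_comm, pv_bxor_cn, Nat.xor_comm]

theorem pv_bxor_nn (m n : Nat) :
    PySem.Int.bxor (-(m : Int) - 1) (-(n : Int) - 1) = ((m ^^^ n : Nat) : Int) := by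
  have h1 : ¬ (0 : Int) ≤ -(m : Int) - 1 := by omega
  have h2 : ¬ (0 : Int) ≤ -(n : Int) - 1 := by omega
  simp only [PySem.Int.bxor, if_neg h1, if_neg h2]
  have hm : (-(-(m : Int) - 1) - 1) = (m : Int) := by ring
  have hn : (-(-(n : Int) - 1) - 1) = (n : Int) := by ring
  rw [hm, hn]
  simp

theorem pv_bxor_assoc (a b c : Int) :
    PySem.Int.bxor (PySem.Int.bxor a b) c = PySem.Int.bxor a (PySem.Int.bxor b c) := by
  rcases pv_int_rep a with ⟨x, rfl⟩ | ⟨x, rfl⟩ <;>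
    rcases pv_int_rep b with ⟨y, rfl⟩ | ⟨y, rfl⟩ <;>
      rcases pv_int_rep c with ⟨z, rfl⟩ | ⟨z, rfl⟩ <;>
        simp [PySem.Int.bxor_natCast, pv_bxor_cn, pv_bxor_nc, pv_bxor_nn, Nat.xor_assoc]

theorem pv_bxor_left_comm (a b c : Int) :
    PySem.Int.bxor a (PySem.Int.bxor b c) = PySem.Int.bxor b (PySem.Int.bxor a c) := by
  rw [← pv_bxor_assoc, PySem.Int.bxor_comm a b, pv_bxor_assoc]

theorem pv_bxor_zero_left (a : Int) : PySem.Int.bxor 0 a = a := by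
  rw [PySem.Int.bxor_comm, PySem.Int.bxor_zero]

theorem pv_bxor_cancel (a x : Int) :
    PySem.Int.bxor (PySem.Int.bxor a x) x = a := by
  rw [pv_bxor_assoc, PySem.Int.bxor_self, PySem.Int.bxor_zero]

theorem pv_mod_natCast_two (k : Nat) : PySem.Int.mod (k : Int) 2 = ((k % 2 : Nat) : Int) := by
  simp [PySem.Int.mod, Int.fmod_eq_emod]

-- the total XOR: A's fold over range(n) of i+1 followed by ^(n+1) = B's fold over range(1, n+2)
theorem pv_total_eq (n : Nat) :
    PySem.Int.bxor
      ((PySem.List.pyRange 0 (n : Int) 1).foldl (fun t i => PySem.Int.bxor t (i + 1)) 0)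
      ((n : Int) + 1)
    = (PySem.List.pyRange 1 ((n : Int) + 2) 1).foldl (fun t k => PySem.Int.bxor t k) 0 := by
  have hsplit : PySem.List.pyRange 1 ((n : Int) + 2) 1
      = PySem.List.pyRange 1 ((n : Int) + 1) 1 ++ [(n : Int) + 1] := by
    have := PySem.List.pyRange_one_succ_right (a := 1) (b := (n : Int) + 1) (by omega)
    simpa [add_assoc] using this
  rw [hsplit, List.foldl_append]
  simp only [List.foldl_cons, List.foldl_nil]
  congr 1
  rw [PySem.List.pyRange_one 0 (n : Int), PySem.List.pyRange_one 1 ((n : Int) + 1)]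
  have h0 : ((n : Int) - 0).toNat = n := by omega
  have h1 : ((n : Int) + 1 - 1).toNat = n := by omega
  rw [h0, h1, List.foldl_map, List.foldl_map]
  exact PySem.List.foldl_congr_mem _ _ _ _ (by intro t k _; congr 1; ring)

-- XOR of the elements at stride 2 from the head of the list
def pvEveryOther : List Int → Int → Int
  | [], acc => acc
  | [a], acc => PySem.Int.bxor acc a
  | a :: _ :: r, acc => pvEveryOther r (PySem.Int.bxor acc a)

theorem pvEveryOther_nil (acc : Int) : pvEveryOther [] acc = acc := rfl

theorem pvEveryOther_cons (a : Int) (r : List Int) (acc : Int) :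
    pvEveryOther (a :: r) acc = pvEveryOther (r.drop 1) (PySem.Int.bxor acc a) := by
  cases r <;> simp [pvEveryOther]

theorem pv_xorStride_eq (xs : List Int) (acc : Int) (i : Nat) :
    xorStride xs acc i = pvEveryOther (xs.drop i) acc := by
  induction acc, i using xorStride.induct xs with
  | case1 acc i h ih =>
    rw [xorStride, dif_pos h, ih, List.drop_eq_getElem_cons h, pvEveryOther_cons,
      List.drop_drop]
    congr 2
    simp [PySem.List.pyGet?_natCast, List.getElem?_eq_getElem h]
  | case2 acc i h =>
    rw [xorStride, dif_neg h, List.drop_of_length_le (by omega), pvEveryOther_nil]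

-- A's parity fold over enumerated entries, characterised structurally
theorem pv_enumFold (xs : List Int) : ∀ (k : Nat) (ex : Int),
    (PySem.List.enumerate xs (k : Int)).foldl
      (fun ex p => if PySem.Int.mod p.1 2 ≠ 0 then PySem.Int.bxor ex p.2 else ex) ex
    = pvEveryOther (if k % 2 = 0 then xs.drop 1 else xs) ex := by
  induction xs with
  | nil =>
    intro k ex
    rw [PySem.List.enumerate_nil, List.foldl_nil]
    split <;> simp [pvEveryOther_nil]
  | cons a r ih =>
    intro k ex
    rw [PySem.List.enumerate_cons, List.foldl_cons]
    have hk1 : (k : Int) + 1 = ((k + 1 : Nat) : Int) := by push_cast; ring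
    rcases Nat.even_or_odd k with he | ho
    · have h0 : k % 2 = 0 := Nat.even_iff.mp he
      have h1 : (k + 1) % 2 = 1 := by omega
      have hm : PySem.Int.mod (k : Int) 2 = 0 := by
        rw [pv_mod_natCast_two, h0]; rfl
      rw [if_neg (by rw [hm]; simp), hk1, ih (k + 1) ex, if_neg (by omega), if_pos h0]
      simp
    · have h0 : k % 2 = 1 := Nat.odd_iff.mp ho
      have h1 : (k + 1) % 2 = 0 := by omega
      have hm : PySem.Int.mod (k : Int) 2 = 1 := by
        rw [pv_mod_natCast_two, h0]; rfl
      rw [if_pos (by rw [hm]; norm_num), hk1, ih (k + 1) (PySem.Int.bxor ex a), if_pos h1,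
        if_neg (by omega), pvEveryOther_cons]

-- last element of a snoc through Python's xs[-1]
theorem pv_last_snoc (pre : List Int) (a : Int) :
    (PySem.List.pyGet? (pre ++ [a]) (-1)).getD 0 = a := by
  simp [PySem.List.pyGet?, PySem.List.pyIdx?]

-- the common output shape: prefix-XOR scan seeded with `a`
def pvTailScan (a : Int) : List Int → List Int
  | [] => []
  | v :: r => PySem.Int.bxor a v :: pvTailScan (PySem.Int.bxor a v) r

theorem pv_ansFold (xs : List Int) : ∀ (pre : List Int) (a : Int),
    xs.foldl (fun ans v => ans ++ [PySem.Int.bxor ((PySem.List.pyGet? ans (-1)).getD 0) v])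
      (pre ++ [a])
    = pre ++ a :: pvTailScan a xs := by
  induction xs with
  | nil => intro pre a; simp [pvTailScan]
  | cons v r ih =>
    intro pre a
    rw [List.foldl_cons, pv_last_snoc]
    rw [ih (pre ++ [a]) (PySem.Int.bxor a v), pvTailScan]
    simp

-- pulling the seed out of a left XOR-fold
theorem pv_foldl_init (xs : List Int) : ∀ (c : Int),
    xs.foldl (fun q v => PySem.Int.bxor q v) c
    = PySem.Int.bxor c (xs.foldl (fun q v => PySem.Int.bxor q v) 0) := by
  induction xs with
  | nil => intro c; simp
  | cons v r ih =>
    intro c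
    rw [List.foldl_cons, List.foldl_cons, ih (PySem.Int.bxor c v),
      ih (PySem.Int.bxor 0 v), pv_bxor_zero_left, pv_bxor_assoc]

-- the two interleaved stride XORs together give the XOR of the whole list
theorem pv_stride_split (xs : List Int) : ∀ (a b : Int),
    PySem.Int.bxor (pvEveryOther xs a) (pvEveryOther (xs.drop 1) b)
    = PySem.Int.bxor (PySem.Int.bxor a b) (xs.foldl (fun q v => PySem.Int.bxor q v) 0) := by
  induction xs with
  | nil => intro a b; simp [pvEveryOther_nil]
  | cons v r ih =>
    intro a b
    rw [pvEveryOther_cons]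
    have hd : List.drop 1 (v :: r) = r := rfl
    rw [hd, PySem.Int.bxor_comm, ih, List.foldl_cons, pv_bxor_zero_left, pv_foldl_init r v]
    simp only [pv_bxor_assoc]
    rw [pv_bxor_left_comm b a]

-- snoc step of the prefix-XOR scan
theorem pv_tailScan_snoc (ys : List Int) : ∀ (a v : Int),
    pvTailScan a (ys ++ [v])
    = pvTailScan a ys ++ [PySem.Int.bxor (ys.foldl (fun q w => PySem.Int.bxor q w) a) v] := by
  induction ys with
  | nil => intro a v; simp [pvTailScan]
  | cons u r ih =>
    intro a v
    rw [List.cons_append, pvTailScan, pvTailScan, ih (PySem.Int.bxor a u) v, List.foldl_cons]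
    simp

-- reversing a seeded scan gives the scan of the reversed list seeded with the final value
theorem pv_scan_reverse (xs : List Int) : ∀ (a : Int),
    (a :: pvTailScan a xs).reverse
    = (xs.foldl (fun q v => PySem.Int.bxor q v) a)
      :: pvTailScan (xs.foldl (fun q v => PySem.Int.bxor q v) a) xs.reverse := by
  induction xs using List.reverseRecOn with
  | nil => intro a; simp [pvTailScan]
  | append_singleton ys v ih =>
    intro a
    rw [pv_tailScan_snoc, List.foldl_append, List.foldl_cons, List.foldl_nil,
      List.reverse_append, List.reverse_singleton, List.singleton_append]
    have hrev : (a :: (pvTailScan a ys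
        ++ [PySem.Int.bxor (ys.foldl (fun q w => PySem.Int.bxor q w) a) v])).reverse
        = PySem.Int.bxor (ys.foldl (fun q w => PySem.Int.bxor q w) a) v
          :: (a :: pvTailScan a ys).reverse := by
      rw [← List.cons_append, List.reverse_append, List.reverse_singleton]
      rfl
    rw [hrev, ih a, pvTailScan, pv_bxor_cancel]

-- ===== VERDICT (by name: the statement is the Claim_ definition above) =====
theorem decode_spec : Claim_equal_decode := by
  intro encoded _
  show decode encoded = decode_alt encoded
  unfold decode decode_alt
  simp only []
  -- split A's pair fold into its two independent components
  rw [PySem.List.foldl_prod_mk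
      (fun (t : Int) (i : Int) => PySem.Int.bxor t (i + 1))
      (fun (ex : Int) (i : Int) =>
        if PySem.Int.mod i 2 ≠ 0 then PySem.Int.bxor ex ((PySem.List.pyGet? encoded i).getD 0)
        else ex)]
  -- A's excluding_first equals the odd-stride XOR of encoded
  have hex :
      (PySem.List.pyRange 0 ((encoded.length : Int)) 1).foldl
        (fun ex i => if PySem.Int.mod i 2 ≠ 0 then
            PySem.Int.bxor ex ((PySem.List.pyGet? encoded i).getD 0) else ex) 0
      = pvEveryOther (encoded.drop 1) 0 := by
    have henum := PySem.List.enumerate_eq_map_pyRange encoded 0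
    have hfold :
        (PySem.List.pyRange 0 (PySem.List.len encoded) 1).foldl
          (fun ex j => if PySem.Int.mod j 2 ≠ 0 then
              PySem.Int.bxor ex (PySem.List.pyGetD encoded j 0) else ex) 0
        = (PySem.List.enumerate encoded 0).foldl
            (fun ex p => if PySem.Int.mod p.1 2 ≠ 0 then PySem.Int.bxor ex p.2 else ex) 0 := by
      rw [henum, List.foldl_map]
    have hlen : PySem.List.len encoded = (encoded.length : Int) := by
      simp [PySem.List.len_eq]
    have hgetD : ∀ j, PySem.List.pyGetD encoded j 0 = (PySem.List.pyGet? encoded j).getD 0 := by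
      intro j; simp [PySem.List.pyGetD]
    rw [hlen] at hfold
    simp only [hgetD] at hfold
    rw [hfold]
    have h2 := pv_enumFold encoded 0 0
    simp only [Nat.cast_zero] at h2
    rw [h2]
    simp
  rw [hex, pv_total_eq encoded.length, pv_xorStride_eq encoded 0 0, List.drop_zero]
  -- name the shared total and the two stride XORs
  generalize hT : (PySem.List.pyRange 1 ((encoded.length : Int) + 2) 1).foldl
      (fun t k => PySem.Int.bxor t k) 0 = T
  -- A's output is the scan seeded with first = T ^ odds
  have hA := pv_ansFold encoded [] (PySem.Int.bxor T (pvEveryOther (encoded.drop 1) 0))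
  rw [List.nil_append, List.nil_append] at hA
  rw [hA]
  -- B's res is the scan of the reversed list seeded with last = T ^ evens
  have hB := pv_ansFold encoded.reverse [] (PySem.Int.bxor T (pvEveryOther encoded 0))
  rw [List.nil_append, List.nil_append] at hB
  rw [hB]
  -- last = foldl-XOR of encoded starting from first
  have hlast :
      encoded.foldl (fun q v => PySem.Int.bxor q v)
        (PySem.Int.bxor T (pvEveryOther (encoded.drop 1) 0))
      = PySem.Int.bxor T (pvEveryOther encoded 0) := by
    rw [pv_foldl_init]
    have hx := pv_stride_split encoded 0 0
    rw [pv_bxor_zero_left, pv_bxor_zero_left] at hx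
    rw [← hx, pv_bxor_assoc]
    congr 1
    rw [pv_bxor_left_comm, PySem.Int.bxor_self, PySem.Int.bxor_zero]
  -- conclude via the reversed-scan characterisation
  have hrev := pv_scan_reverse encoded (PySem.Int.bxor T (pvEveryOther (encoded.drop 1) 0))
  rw [hlast] at hrev
  rw [← hrev, List.reverse_reverse]
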